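-- pv_equiv track=rewrite | github.com/clummmmm/Red-Magician | cogs/file.py | paginate_string
-- ===== SOURCE A (Python) =====
-- def paginate_string(content):
--     page = '```'
--     pages = []
--     for item in content:
--         if len(page + '\n' + item) > 1997:
--             page = page + '```'
--             pages.append(page)
--             page = '```'
--         page = page + '\n' + item
--     page = page + '```'
--     pages.append(page)
--     return pages
-- ===== SOURCE B (Python) =====
-- def paginate_string(content):
--     groups = []
--     cur = []
--     cur_len = 3
--     for item in content:
--         if cur_len + 1 + len(item) > 1997:
--             groups.append(cur)
--             cur = []
--             cur_len = 3
--         cur.append(item)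
--         cur_len += 1 + len(item)
--     groups.append(cur)
--     return ['```' + ''.join('\n' + x for x in group) + '```' for group in groups]
-- ===== Notes on version B (the rewrite author's own statement) =====
-- stated objective: alternative
-- what changed: B separates partitioning from formatting: a first pass groups items using only a running integer length (never building page strings), then a second pass formats each group as a code block; A grows and measures the page string itself inside one loop.
import Mathlib
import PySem

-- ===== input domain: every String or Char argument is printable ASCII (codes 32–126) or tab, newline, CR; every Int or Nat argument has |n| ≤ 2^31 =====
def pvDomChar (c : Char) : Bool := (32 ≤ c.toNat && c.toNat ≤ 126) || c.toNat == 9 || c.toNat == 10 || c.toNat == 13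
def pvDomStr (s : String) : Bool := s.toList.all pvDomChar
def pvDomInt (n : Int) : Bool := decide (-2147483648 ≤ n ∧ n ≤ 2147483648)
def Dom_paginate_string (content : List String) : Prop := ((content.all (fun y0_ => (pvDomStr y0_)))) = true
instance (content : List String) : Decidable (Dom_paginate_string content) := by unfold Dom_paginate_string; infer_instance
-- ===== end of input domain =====

-- B separates partitioning (running integer length over groups of items) from formatting
-- (each group rendered as one code block); same return value as A, proved below.

-- ===== PORT A =====
-- page strings are carried as List Char (exact for str: concatenation = ++, len = length)
def pvTick : List Char := ['`', '`', '`']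

-- one iteration of A's for-loop: state = (page, pages)
def pvAStep (st : List Char × List (List Char)) (item : String) : List Char × List (List Char) :=
  let st' := if (st.1 ++ '\n' :: item.toList).length > 1997
             then (pvTick, st.2 ++ [st.1 ++ pvTick])
             else st
  (st'.1 ++ '\n' :: item.toList, st'.2)

def paginate_string (content : List String) : List String :=
  let st := content.foldl pvAStep (pvTick, [])
  (st.2 ++ [st.1 ++ pvTick]).map String.mk

-- ===== PORT B =====
-- first pass: state = (cur_len, cur, groups); flush then always append
def pvBStep (st : Nat × List String × List (List String)) (item : String) :
    Nat × List String × List (List String) :=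
  let st' := if st.1 + 1 + item.toList.length > 1997
             then (3, ([] : List String), st.2.2 ++ [st.2.1])
             else st
  (st'.1 + 1 + item.toList.length, st'.2.1 ++ [item], st'.2.2)

-- second pass: '```' + ''.join('\n' + x for x in group) + '```'
def pvFormat (g : List String) : String :=
  String.mk (pvTick ++ (g.flatMap fun x => '\n' :: x.toList) ++ pvTick)

def paginate_string_alt (content : List String) : List String :=
  let st := content.foldl pvBStep (3, [], [])
  (st.2.2 ++ [st.2.1]).map pvFormat

-- ===== PRECONDITION & SPEC =====
def Spec_paginate_string (content : List String) (out : List String) : Prop := out = paginate_string_alt content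
instance (content : List String) (out : List String) : Decidable (Spec_paginate_string content out) := by unfold Spec_paginate_string; infer_instance

-- ===== CLAIM (what is proved, stated in full; the proofs are below) =====
def Claim_equal_paginate_string : Prop := ∀ (content : List String), Dom_paginate_string content → Spec_paginate_string content (paginate_string content)

-- ===== LEMMAS AND PROOFS =====

-- the page string A carries for a current group g
def pvPage (g : List String) : List Char :=
  pvTick ++ (g.flatMap fun x => '\n' :: x.toList)

lemma pvPage_append (g : List String) (item : String) :
    pvPage (g ++ [item]) = pvPage g ++ '\n' :: item.toList := by
  simp [pvPage]

lemma pvPage_length (g : List String) (item : String) :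
    (pvPage g ++ '\n' :: item.toList).length = (pvPage g).length + 1 + item.toList.length := by
  simp; omega

lemma pvPage_len_append (g : List String) (item : String) :
    (pvPage (g ++ [item])).length = (pvPage g).length + 1 + item.toList.length := by
  rw [pvPage_append]; simp; omega

lemma pvPage_single_len (item : String) :
    (pvPage [item]).length = 3 + 1 + item.toList.length := by
  simp [pvPage, pvTick]; omega

-- loop correspondence: A's fold state is B's fold state under pvPage
lemma pv_loop_eq : ∀ (content : List String) (cur : List String) (gs : List (List String)),
    content.foldl pvAStep (pvPage cur, gs.map (fun g => pvPage g ++ pvTick)) =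
      (pvPage (content.foldl pvBStep ((pvPage cur).length, cur, gs)).2.1,
       ((content.foldl pvBStep ((pvPage cur).length, cur, gs)).2.2).map
         (fun g => pvPage g ++ pvTick)) := by
  intro content
  induction content with
  | nil => intro cur gs; simp
  | cons item rest ih =>
    intro cur gs
    by_cases h : (pvPage cur ++ '\n' :: item.toList).length > 1997
    · have h' : (pvPage cur).length + 1 + item.toList.length > 1997 := by
        have := pvPage_length cur item; omega
      have hA : pvAStep (pvPage cur, gs.map (fun g => pvPage g ++ pvTick)) item =
          (pvPage [item], (gs ++ [cur]).map (fun g => pvPage g ++ pvTick)) := by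
        simp only [pvAStep]
        rw [if_pos h]
        simp [pvPage]
      have hB : pvBStep ((pvPage cur).length, cur, gs) item =
          ((pvPage [item]).length, [item], gs ++ [cur]) := by
        simp only [pvBStep]
        rw [if_pos h', pvPage_single_len]
        rfl
      simp only [List.foldl_cons, hA, hB]
      exact ih [item] (gs ++ [cur])
    · have h' : ¬ ((pvPage cur).length + 1 + item.toList.length > 1997) := by
        have := pvPage_length cur item; omega
      have hA : pvAStep (pvPage cur, gs.map (fun g => pvPage g ++ pvTick)) item =
          (pvPage (cur ++ [item]), gs.map (fun g => pvPage g ++ pvTick)) := by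
        simp only [pvAStep]
        rw [if_neg h, pvPage_append]
      have hB : pvBStep ((pvPage cur).length, cur, gs) item =
          ((pvPage (cur ++ [item])).length, cur ++ [item], gs) := by
        simp only [pvBStep]
        rw [if_neg h', pvPage_len_append]
      simp only [List.foldl_cons, hA, hB]
      exact ih (cur ++ [item]) gs

-- ===== VERDICT (by name: the statement is the Claim_ definition above) =====
theorem paginate_string_spec : Claim_equal_paginate_string := by
  intro content _
  unfold Spec_paginate_string paginate_string paginate_string_alt
  have e : pvTick.length = 3 := rfl
  have h0 : pvPage [] = pvTick := by simp [pvPage]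
  have hmain := pv_loop_eq content [] []
  rw [h0, e] at hmain
  simp only [List.map_nil] at hmain
  simp only [hmain]
  simp [pvFormat, pvPage]
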